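-- pv_equiv track=rewrite | github.com/bitsofbits/advent_of_code | 2023/day_12/pythonimp/implementation.py | permute_record
-- ===== SOURCE A (Python) =====
-- def permute_record(seq):
--     """
--     >>> list(permute_record('????.#...#...'))[:3]
--     ['.....#...#...', '#....#...#...', '.#...#...#...']
--     """
--     indices = [i for (i, x) in enumerate(seq) if x == '?']
--     n_bits = len(indices)
--     for i in range(2**n_bits):
--         permuted = list(seq)
--         for j, index in enumerate(indices):
--             x = '#' if (i // 2**j) % 2 else '.'
--             permuted[index] = x
--         yield ''.join(permuted)
-- ===== SOURCE B (Python) =====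
-- def permute_record(seq):
--     indices = [i for (i, x) in enumerate(seq) if x == '?']
--     results = [list(seq)]
--     for index in indices:
--         next_results = []
--         for choice in '.#':
--             for r in results:
--                 filled = r.copy()
--                 filled[index] = choice
--                 next_results.append(filled)
--         results = next_results
--     for r in results:
--         yield ''.join(r)
-- ===== Notes on version B (the rewrite author's own statement) =====
-- stated objective: alternative
-- what changed: Replaces the binary-counter derivation (each of the 2^n outputs rebuilt independently from the bits of a counter) with incremental doubling: the list of partial fill-ins is expanded once per '?' index, appending the '.'-copies then the '#'-copies, which reproduces the little-endian order.
import Mathlib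
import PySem

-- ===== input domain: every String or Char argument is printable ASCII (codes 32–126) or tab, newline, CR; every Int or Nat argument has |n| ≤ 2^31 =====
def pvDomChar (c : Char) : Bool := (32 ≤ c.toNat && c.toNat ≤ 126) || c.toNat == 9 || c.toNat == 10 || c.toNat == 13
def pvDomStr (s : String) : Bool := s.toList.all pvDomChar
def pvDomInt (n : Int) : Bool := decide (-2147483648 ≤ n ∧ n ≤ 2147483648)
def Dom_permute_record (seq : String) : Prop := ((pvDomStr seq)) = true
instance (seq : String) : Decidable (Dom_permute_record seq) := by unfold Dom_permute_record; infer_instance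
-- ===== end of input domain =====

-- B differs from A only in how the 2^n fill-ins are produced (doubling instead of a
-- binary counter); both are total, so there is no Pre_. A is a generator; equivalence
-- is about the list of yielded values.

-- ===== PORT A =====
-- All list indices here come from enumerate, so they are nonnegative and in range;
-- Nat indexing/division/mod is exact for them.
def permute_record (seq : String) : List String :=
  let cs := seq.toList
  let indices := (List.zipIdx cs).filterMap (fun p => if p.1 = '?' then some p.2 else none)
  let n_bits := indices.length
  (List.range (2 ^ n_bits)).map (fun i =>
    String.ofList ((List.zipIdx indices).foldl
      (fun permuted ji =>
        permuted.set ji.1 (if (i / 2 ^ ji.2) % 2 ≠ 0 then '#' else '.')) cs))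

-- ===== PORT B =====
def permute_record_alt (seq : String) : List String :=
  let cs := seq.toList
  let indices := (List.zipIdx cs).filterMap (fun p => if p.1 = '?' then some p.2 else none)
  let results := indices.foldl
    (fun results index =>
      ['.', '#'].foldl (fun acc choice => acc ++ results.map (fun r => r.set index choice)) [])
    [cs]
  results.map String.ofList

-- ===== PRECONDITION & SPEC =====
def Spec_permute_record (seq : String) (out : List String) : Prop := out = permute_record_alt seq
instance (seq : String) (out : List String) : Decidable (Spec_permute_record seq out) := by unfold Spec_permute_record; infer_instance

-- ===== CLAIM (what is proved, stated in full; the proofs are below) =====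
def Claim_equal_permute_record : Prop := ∀ (seq : String), Dom_permute_record seq → Spec_permute_record seq (permute_record seq)

-- ===== LEMMAS AND PROOFS =====

-- the fill-in of a single counter value i: bit j of i chooses '#'/'.' at the j-th '?' index
def applyBits (i : Nat) : List Nat → List Char → List Char
  | [], r => r
  | idx :: rest, r => applyBits (i / 2) rest (r.set idx (if i % 2 ≠ 0 then '#' else '.'))

-- A's inner loop computes applyBits
theorem foldl_zipIdx_eq_applyBits (idxs : List Nat) (i j0 : Nat) (r : List Char) :
    (List.zipIdx idxs j0).foldl
      (fun permuted ji =>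
        permuted.set ji.1 (if (i / 2 ^ ji.2) % 2 ≠ 0 then '#' else '.')) r
    = applyBits (i / 2 ^ j0) idxs r := by
  induction idxs generalizing j0 r with
  | nil => simp [applyBits]
  | cons idx rest ih =>
    simp only [List.zipIdx_cons, List.foldl_cons, applyBits]
    rw [ih]
    have : i / 2 ^ j0 / 2 = i / 2 ^ (j0 + 1) := by
      rw [Nat.div_div_eq_div_mul, pow_succ]
    rw [this]

theorem range_two_mul_flatMap {α : Type} (m : Nat) (f : Nat → List α) :
    (List.range (2 * m)).flatMap f
    = (List.range m).flatMap (fun q => f (2 * q) ++ f (2 * q + 1)) := by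
  induction m with
  | zero => simp
  | succ m ih =>
    have h1 : 2 * (m + 1) = (2 * m + 1) + 1 := by ring
    rw [h1, List.range_succ, List.range_succ, List.range_succ]
    simp only [List.flatMap_append, List.flatMap_cons, List.flatMap_nil, ih]
    simp [List.append_assoc]

-- B's expansion step, written out
theorem stepEq :
    (fun (results : List (List Char)) (index : Nat) =>
      ['.', '#'].foldl (fun acc choice => acc ++ results.map (fun r => r.set index choice)) [])
    = fun results index =>
        results.map (fun r => r.set index '.') ++ results.map (fun r => r.set index '#') := by
  funext results index
  simp

theorem flatMap_singleton_eq_map {a b : Type} (l : List a) (g : a -> List b) :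
    l.flatMap (fun i => [g i]) = l.map g := by
  induction l with
  | nil => rfl
  | cons x xs ih => simp [ih]

-- B's doubling loop enumerates exactly the counter values 0, ..., 2^n - 1
theorem foldB_eq_flatMap (idxs : List Nat) (rs : List (List Char)) :
    idxs.foldl
      (fun results index =>
        results.map (fun r => r.set index '.') ++ results.map (fun r => r.set index '#'))
      rs
    = (List.range (2 ^ idxs.length)).flatMap (fun i => rs.map (applyBits i idxs)) := by
  induction idxs generalizing rs with
  | nil => simp [applyBits]
  | cons idx rest ih =>
    simp only [List.foldl_cons]
    rw [ih]
    have hlen : 2 ^ (idx :: rest).length = 2 * 2 ^ rest.length := by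
      simp [List.length_cons, pow_succ]; ring
    rw [hlen, range_two_mul_flatMap]
    refine List.flatMap_congr ?_
    intro q _
    simp only [applyBits, List.map_append, List.map_map]
    have h0 : (2 * q) % 2 = 0 := by omega
    have h1 : (2 * q + 1) % 2 = 1 := by omega
    have d0 : 2 * q / 2 = q := by omega
    have d1 : (2 * q + 1) / 2 = q := by omega
    simp only [h0, h1, d0, d1]
    rfl

theorem permute_record_eq (seq : String) :
    permute_record seq = permute_record_alt seq := by
  unfold permute_record permute_record_alt
  simp only [stepEq, foldB_eq_flatMap]
  rw [show (fun (i : Nat) => ([seq.toList].map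
        (applyBits i ((List.zipIdx seq.toList).filterMap
          (fun p => if p.1 = '?' then some p.2 else none)))))
      = fun i => [applyBits i ((List.zipIdx seq.toList).filterMap
          (fun p => if p.1 = '?' then some p.2 else none)) seq.toList] from by
        funext i; simp]
  rw [flatMap_singleton_eq_map, List.map_map]
  apply List.map_congr_left
  intro i _
  rw [foldl_zipIdx_eq_applyBits]
  simp

-- ===== VERDICT (by name: the statement is the Claim_ definition above) =====
theorem permute_record_spec : Claim_equal_permute_record := by
  intro seq _
  unfold Spec_permute_record
  exact permute_record_eq seq
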